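-- pv_equiv track=rewrite | github.com/jasmine6789/Research-Assistant-AI-Agent | src/utils/figure_caption_generator.py | _classify_visualization_type
-- ===== SOURCE A (Python) =====
-- from typing import Dict, Any, List, Optional, Tuple
--
-- def _classify_visualization_type(visualization: Dict[str, Any]) -> str:
--     """Classify visualization type from metadata"""
--     title = visualization.get('title', '').lower()
--     viz_type = visualization.get('type', '').lower()
--     description = visualization.get('description', '').lower()
--
--     # Performance/accuracy charts
--     if any(term in title + viz_type + description for term in
--            ['performance', 'accuracy', 'comparison', 'model']):
--         return 'performance_comparison'
--
--     # Feature importance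
--     elif any(term in title + viz_type + description for term in
--             ['importance', 'feature', 'ranking', 'shap']):
--         return 'feature_importance'
--
--     # Training/convergence
--     elif any(term in title + viz_type + description for term in
--             ['training', 'convergence', 'epoch', 'learning']):
--         return 'accuracy_trends'
--
--     # Distribution/histogram
--     elif any(term in title + viz_type + description for term in
--             ['distribution', 'histogram', 'frequency']):
--         return 'distribution'
--
--     # Correlation/heatmap
--     elif any(term in title + viz_type + description for term in
--             ['correlation', 'heatmap', 'matrix']):
--         return 'correlation'
--
--     # Confusion matrix
--     elif any(term in title + viz_type + description for term in
--             ['confusion', 'classification']):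
--         return 'confusion_matrix'
--
--     # ROC curve
--     elif any(term in title + viz_type + description for term in
--             ['roc', 'auc', 'sensitivity', 'specificity']):
--         return 'roc_curve'
--
--     # Time series
--     elif any(term in title + viz_type + description for term in
--             ['time', 'temporal', 'trend', 'over time']):
--         return 'time_series'
--
--     # Default to performance comparison
--     else:
--         return 'performance_comparison'
-- ===== SOURCE B (Python) =====
-- # B: instead of an ordered if/elif chain, flatten every keyword to a rank,
-- # collect the ranks of all keywords occurring in the combined text, and map
-- # the minimum rank back to its label (argmin reduction instead of first-match branching).
-- KEYWORD_RANK = {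
--     'performance': 0, 'accuracy': 0, 'comparison': 0, 'model': 0,
--     'importance': 1, 'feature': 1, 'ranking': 1, 'shap': 1,
--     'training': 2, 'convergence': 2, 'epoch': 2, 'learning': 2,
--     'distribution': 3, 'histogram': 3, 'frequency': 3,
--     'correlation': 4, 'heatmap': 4, 'matrix': 4,
--     'confusion': 5, 'classification': 5,
--     'roc': 6, 'auc': 6, 'sensitivity': 6, 'specificity': 6,
--     'time': 7, 'temporal': 7, 'trend': 7, 'over time': 7,
-- }
-- LABELS = ['performance_comparison', 'feature_importance', 'accuracy_trends',
--           'distribution', 'correlation', 'confusion_matrix', 'roc_curve',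
--           'time_series']
--
-- def _classify_visualization_type(visualization):
--     combined = ''.join(visualization.get(k, '').lower()
--                        for k in ('title', 'type', 'description'))
--     ranks = [rank for kw, rank in KEYWORD_RANK.items() if kw in combined]
--     return LABELS[min(ranks)] if ranks else 'performance_comparison'
-- ===== Notes on version B (the rewrite author's own statement) =====
-- stated objective: alternative
-- what changed: Replaces the ordered if/elif first-match branch chain by an argmin reduction: every keyword is flattened to a numeric rank, the ranks of all keywords present in the combined lowered text are collected, and the minimum rank is mapped back to its label.
import Mathlib
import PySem

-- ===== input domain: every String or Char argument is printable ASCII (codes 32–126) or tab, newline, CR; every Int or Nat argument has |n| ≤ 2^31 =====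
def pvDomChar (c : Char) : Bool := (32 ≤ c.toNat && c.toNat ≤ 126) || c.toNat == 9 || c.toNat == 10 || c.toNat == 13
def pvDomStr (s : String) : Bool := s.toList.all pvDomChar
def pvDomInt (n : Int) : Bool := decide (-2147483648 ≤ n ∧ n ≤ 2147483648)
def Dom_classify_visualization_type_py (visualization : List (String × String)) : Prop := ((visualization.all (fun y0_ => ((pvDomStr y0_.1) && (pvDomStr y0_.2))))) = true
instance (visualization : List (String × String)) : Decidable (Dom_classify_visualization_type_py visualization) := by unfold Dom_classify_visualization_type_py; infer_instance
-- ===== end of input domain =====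

-- B replaces A's ordered if/elif keyword chain by an argmin reduction: every keyword is
-- flattened to a rank, the ranks of the keywords occurring in the text are collected, and
-- the minimum rank is mapped back to its label (objective: alternative decomposition).


-- ===== PORT A =====
def classify_visualization_type_py (visualization : List (String × String)) : String :=
  let title := PySem.Str.lower (((visualization.lookup "title").getD ""))
  let viz_type := PySem.Str.lower (((visualization.lookup "type").getD ""))
  let description := PySem.Str.lower (((visualization.lookup "description").getD ""))
  if (["performance", "accuracy", "comparison", "model"].any
      (fun term => PySem.Str.isIn term (title ++ viz_type ++ description))) then
    "performance_comparison"
  else if (["importance", "feature", "ranking", "shap"].any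
      (fun term => PySem.Str.isIn term (title ++ viz_type ++ description))) then
    "feature_importance"
  else if (["training", "convergence", "epoch", "learning"].any
      (fun term => PySem.Str.isIn term (title ++ viz_type ++ description))) then
    "accuracy_trends"
  else if (["distribution", "histogram", "frequency"].any
      (fun term => PySem.Str.isIn term (title ++ viz_type ++ description))) then
    "distribution"
  else if (["correlation", "heatmap", "matrix"].any
      (fun term => PySem.Str.isIn term (title ++ viz_type ++ description))) then
    "correlation"
  else if (["confusion", "classification"].any
      (fun term => PySem.Str.isIn term (title ++ viz_type ++ description))) then
    "confusion_matrix"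
  else if (["roc", "auc", "sensitivity", "specificity"].any
      (fun term => PySem.Str.isIn term (title ++ viz_type ++ description))) then
    "roc_curve"
  else if (["time", "temporal", "trend", "over time"].any
      (fun term => PySem.Str.isIn term (title ++ viz_type ++ description))) then
    "time_series"
  else
    "performance_comparison"

-- ===== PORT B =====
-- the KEYWORD_RANK dict of Source B (insertion order preserved)
def pvKeywordRank : List (String × Nat) :=
  [("performance", 0), ("accuracy", 0), ("comparison", 0), ("model", 0),
   ("importance", 1), ("feature", 1), ("ranking", 1), ("shap", 1),
   ("training", 2), ("convergence", 2), ("epoch", 2), ("learning", 2),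
   ("distribution", 3), ("histogram", 3), ("frequency", 3),
   ("correlation", 4), ("heatmap", 4), ("matrix", 4),
   ("confusion", 5), ("classification", 5),
   ("roc", 6), ("auc", 6), ("sensitivity", 6), ("specificity", 6),
   ("time", 7), ("temporal", 7), ("trend", 7), ("over time", 7)]

-- the LABELS list of Source B
def pvLabels : List String :=
  ["performance_comparison", "feature_importance", "accuracy_trends",
   "distribution", "correlation", "confusion_matrix", "roc_curve", "time_series"]

def classify_visualization_type_py_alt (visualization : List (String × String)) : String :=
  let combined := String.join
    ((["title", "type", "description"]).map
      (fun k => PySem.Str.lower (((visualization.lookup k).getD ""))))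
  let ranks := ((pvKeywordRank.filter (fun e => PySem.Str.isIn e.1 combined)).map Prod.snd)
  -- 'LABELS[min(ranks)] if ranks else default'; min? = none iff ranks = [];
  -- getD is exact here since every rank is < pvLabels.length = 8
  match PySem.List.min? ranks (fun x => x) with
  | some r => pvLabels.getD r "performance_comparison"
  | none => "performance_comparison"

-- ===== PRECONDITION & SPEC =====
def Spec_classify_visualization_type_py (visualization : List (String × String)) (out : String) : Prop := out = classify_visualization_type_py_alt visualization
instance (visualization : List (String × String)) (out : String) : Decidable (Spec_classify_visualization_type_py visualization out) := by unfold Spec_classify_visualization_type_py; infer_instance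

-- ===== CLAIM (what is proved, stated in full; the proofs are below) =====
def Claim_equal_classify_visualization_type_py : Prop := ∀ (visualization : List (String × String)), Dom_classify_visualization_type_py visualization → Spec_classify_visualization_type_py visualization (classify_visualization_type_py visualization)

-- ===== LEMMAS AND PROOFS =====
theorem pv_join_three (a b c : String) : String.join [a, b, c] = a ++ b ++ c := by
  simp [String.join]

-- once the running minimum is ≤ every remaining element, min?'s fold keeps it
theorem pv_min_stay (t : List Nat) : ∀ (x : Nat), (∀ y ∈ t, x ≤ y) →
    PySem.List.min? (x :: t) (fun z => z) = some x := by
  induction t with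
  | nil => intro x _; rfl
  | cons y ys ih =>
    intro x h
    have hy : x ≤ y := h y (by simp)
    have hstep : PySem.List.min? (x :: y :: ys) (fun z => z)
        = PySem.List.min? (x :: ys) (fun z => z) := by
      simp only [PySem.List.min?, List.foldl]
      rw [if_neg (by omega)]
    rw [hstep]
    exact ih x (fun z hz => h z (by simp [hz]))

-- on a ≤-sorted list, Python's min (first extremal) is the head
theorem pv_min_sorted (l : List Nat) (h : l.Pairwise (· ≤ ·)) :
    PySem.List.min? l (fun x => x) = l.head? := by
  cases l with
  | nil => rfl
  | cons x t =>
    rw [List.head?]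
    exact pv_min_stay t x (List.pairwise_cons.mp h).1

-- head of the rank hits contributed by one keyword group
theorem pv_group_head (terms : List String) (i : Nat) (c : String) :
    ((((terms.map (fun t => (t, i))).filter (fun e => PySem.Str.isIn e.1 c)).map Prod.snd).head?)
      = (if terms.any (fun t => PySem.Str.isIn t c) then some i else none) := by
  induction terms with
  | nil => rfl
  | cons t ts ih =>
    simp only [List.map_cons, List.filter_cons, List.any_cons]
    by_cases hm : PySem.Str.isIn t c = true
    · rw [if_pos hm]; simp only [hm, Bool.true_or]; simp
    · rw [if_neg hm]
      rw [Bool.not_eq_true] at hm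
      simp only [hm, Bool.false_or]
      exact ih

-- ===== VERDICT (by name: the statement is the Claim_ definition above) =====
theorem classify_visualization_type_py_spec : Claim_equal_classify_visualization_type_py := by
  intro v _
  unfold Spec_classify_visualization_type_py classify_visualization_type_py
    classify_visualization_type_py_alt
  simp only [List.map, pv_join_three]
  set c := PySem.Str.lower ((v.lookup "title").getD "") ++
           PySem.Str.lower ((v.lookup "type").getD "") ++
           PySem.Str.lower ((v.lookup "description").getD "") with hc
  -- replace min? by head? using sortedness of the collected ranks
  have hsorted : (((pvKeywordRank.filter (fun e => PySem.Str.isIn e.1 c)).map Prod.snd).Pairwise (· ≤ ·)) := by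
    rw [List.pairwise_map]
    exact List.Pairwise.filter _ (by unfold pvKeywordRank; decide)
  rw [pv_min_sorted _ hsorted]
  -- split the flat keyword list into its eight rank groups
  have hsplit : pvKeywordRank =
      (["performance", "accuracy", "comparison", "model"].map (fun t => (t, (0 : Nat)))) ++
      (["importance", "feature", "ranking", "shap"].map (fun t => (t, (1 : Nat)))) ++
      (["training", "convergence", "epoch", "learning"].map (fun t => (t, (2 : Nat)))) ++
      (["distribution", "histogram", "frequency"].map (fun t => (t, (3 : Nat)))) ++
      (["correlation", "heatmap", "matrix"].map (fun t => (t, (4 : Nat)))) ++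
      (["confusion", "classification"].map (fun t => (t, (5 : Nat)))) ++
      (["roc", "auc", "sensitivity", "specificity"].map (fun t => (t, (6 : Nat)))) ++
      (["time", "temporal", "trend", "over time"].map (fun t => (t, (7 : Nat)))) := by
    rfl
  rw [hsplit]
  simp only [List.filter_append, List.map_append, List.head?_append, pv_group_head]
  cases h0 : (["performance", "accuracy", "comparison", "model"].any (fun term => PySem.Str.isIn term c)) with
  | true => rfl
  | false =>
    simp only [Bool.false_eq_true, if_false, Option.none_or]
    cases h1 : (["importance", "feature", "ranking", "shap"].any (fun term => PySem.Str.isIn term c)) with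
    | true => rfl
    | false =>
      simp only [Bool.false_eq_true, if_false, Option.none_or]
      cases h2 : (["training", "convergence", "epoch", "learning"].any (fun term => PySem.Str.isIn term c)) with
      | true => rfl
      | false =>
        simp only [Bool.false_eq_true, if_false, Option.none_or]
        cases h3 : (["distribution", "histogram", "frequency"].any (fun term => PySem.Str.isIn term c)) with
        | true => rfl
        | false =>
          simp only [Bool.false_eq_true, if_false, Option.none_or]
          cases h4 : (["correlation", "heatmap", "matrix"].any (fun term => PySem.Str.isIn term c)) with
          | true => rfl
          | false =>
            simp only [Bool.false_eq_true, if_false, Option.none_or]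
            cases h5 : (["confusion", "classification"].any (fun term => PySem.Str.isIn term c)) with
            | true => rfl
            | false =>
              simp only [Bool.false_eq_true, if_false, Option.none_or]
              cases h6 : (["roc", "auc", "sensitivity", "specificity"].any (fun term => PySem.Str.isIn term c)) with
              | true => rfl
              | false =>
                simp only [Bool.false_eq_true, if_false, Option.none_or]
                cases h7 : (["time", "temporal", "trend", "over time"].any (fun term => PySem.Str.isIn term c)) with
                | true => rfl
                | false => simp only [Bool.false_eq_true, if_false]
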